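-- pv_equiv track=rewrite | github.com/Williamhalim/soulbound-server | app.py | determine_archetype
-- ===== SOURCE A (Python) =====
-- def determine_archetype(stats):
--     # Convert trait values to safe integers
--     safe_stats = {}
--     for key in ["bravery", "empathy", "curiosity", "logic"]:
--         try:
--             safe_stats[key] = int(stats.get(key, 0))
--         except (ValueError, TypeError):
--             safe_stats[key] = 0  # fallback if value is invalid
--
--     # Sort by trait values
--     sorted_stats = sorted(safe_stats.items(), key=lambda item: item[1], reverse=True)
--     primary, secondary = sorted_stats[0][0], sorted_stats[1][0]
--
--     # Define archetype map
--     archetype_map = {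
--         ("bravery", "empathy"): "Champion",
--         ("bravery", "curiosity"): "Trailblazer",
--         ("bravery", "logic"): "Ironmind",
--         ("empathy", "bravery"): "Guardian",
--         ("empathy", "curiosity"): "Dreamweaver",
--         ("empathy", "logic"): "Mediator",
--         ("curiosity", "bravery"): "Wanderer",
--         ("curiosity", "empathy"): "Seeker",
--         ("curiosity", "logic"): "Tinker",
--         ("logic", "bravery"): "Strategist",
--         ("logic", "empathy"): "Philosopher",
--         ("logic", "curiosity"): "Architect",
--     }
--
--     # Return matched archetype
--     archetype = archetype_map.get((primary, secondary), "Unknown")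
--
--     return {
--         "archetype": archetype,
--         "primary": primary,
--         "secondary": secondary,
--     }
-- ===== SOURCE B (Python) =====
-- def determine_archetype(stats):
--     def to_int(x):
--         try:
--             return int(x)
--         except (ValueError, TypeError):
--             return 0
--
--     names = ("bravery", "empathy", "curiosity", "logic")
--     vals = tuple(to_int(stats.get(k, 0)) for k in names)
--
--     # Python max returns the FIRST maximal element, matching the stable
--     # reverse=True sort's tie-breaking on the fixed trait order.
--     pi = max(range(4), key=vals.__getitem__)
--     si = max((i for i in range(4) if i != pi), key=vals.__getitem__)
--
--     # Archetype by (primary, secondary) index; diagonal cells are unreachable.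
--     table = (
--         ("", "Champion", "Trailblazer", "Ironmind"),
--         ("Guardian", "", "Dreamweaver", "Mediator"),
--         ("Wanderer", "Seeker", "", "Tinker"),
--         ("Strategist", "Philosopher", "Architect", ""),
--     )
--
--     return {
--         "archetype": table[pi][si],
--         "primary": names[pi],
--         "secondary": names[si],
--     }
-- ===== Notes on version B (the rewrite author's own statement) =====
-- stated objective: alternative
-- what changed: Replaces the reverse=True stable sort and the (primary,secondary)->name dict by index arithmetic: two first-max scans (Python max with a key, which keeps the first maximal element, reproducing the stable sort's tie-breaking) over the value tuple, and a 4x4 name table indexed by the two trait indices.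
import Mathlib
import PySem

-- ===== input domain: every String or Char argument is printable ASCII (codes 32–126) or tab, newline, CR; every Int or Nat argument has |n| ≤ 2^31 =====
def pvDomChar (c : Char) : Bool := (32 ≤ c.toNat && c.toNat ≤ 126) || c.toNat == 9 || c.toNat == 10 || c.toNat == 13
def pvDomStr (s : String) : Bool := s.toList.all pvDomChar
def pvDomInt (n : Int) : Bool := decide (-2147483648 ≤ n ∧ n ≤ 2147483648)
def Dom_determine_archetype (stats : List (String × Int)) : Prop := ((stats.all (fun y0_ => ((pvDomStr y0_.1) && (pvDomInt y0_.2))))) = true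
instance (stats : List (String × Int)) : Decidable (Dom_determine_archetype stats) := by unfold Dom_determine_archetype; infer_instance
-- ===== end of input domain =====

-- B replaces the stable reverse sort and the (pair -> name) dict by index arithmetic:
-- two first-max scans over the value tuple and a 4x4 name table indexed by the two indices.

-- ===== PORT A =====
-- A's archetype_map literal
def pvArchMapA : PySem.Dict (String × String) String := PySem.Dict.ofList
  [ (("bravery", "empathy"), "Champion"), (("bravery", "curiosity"), "Trailblazer"),
    (("bravery", "logic"), "Ironmind"), (("empathy", "bravery"), "Guardian"),
    (("empathy", "curiosity"), "Dreamweaver"), (("empathy", "logic"), "Mediator"),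
    (("curiosity", "bravery"), "Wanderer"), (("curiosity", "empathy"), "Seeker"),
    (("curiosity", "logic"), "Tinker"), (("logic", "bravery"), "Strategist"),
    (("logic", "empathy"), "Philosopher"), (("logic", "curiosity"), "Architect") ]
-- values are Int here, so int(...) is the identity and the except branch never fires
def determine_archetype (stats : List (String × Int)) : List (String × String) :=
  let d : PySem.Dict String Int := PySem.Dict.mk stats
  let safe : PySem.Dict String Int :=
    (["bravery", "empathy", "curiosity", "logic"]).foldl
      (fun s k => s.insert k (d.getD k 0)) PySem.Dict.empty
  let sorted_stats := PySem.List.sorted safe.items (fun item => item.2) true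
  match sorted_stats with
  | p0 :: p1 :: _ =>
    let primary := p0.1
    let secondary := p1.1
    let archetype := pvArchMapA.getD (primary, secondary) "Unknown"
    [("archetype", archetype), ("primary", primary), ("secondary", secondary)]
  | _ => []   -- unreachable: sorted_stats always has four entries

-- ===== PORT B =====
-- B's 4x4 table, rows/columns in the fixed trait order; the diagonal is unreachable
def pvArchTable : List (List String) :=
  [["", "Champion", "Trailblazer", "Ironmind"],
   ["Guardian", "", "Dreamweaver", "Mediator"],
   ["Wanderer", "Seeker", "", "Tinker"],
   ["Strategist", "Philosopher", "Architect", ""]]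
-- values are Int here, so to_int is the identity and the except branch never fires
def determine_archetype_alt (stats : List (String × Int)) : List (String × String) :=
  let names := ["bravery", "empathy", "curiosity", "logic"]
  let d : PySem.Dict String Int := PySem.Dict.mk stats
  let vals := names.map (fun k => d.getD k 0)
  -- Python's max keeps the FIRST maximal element: fold with strict '>'
  let pi := [1, 2, 3].foldl (fun p i => if vals.getD i 0 > vals.getD p 0 then i else p) 0
  let others := [0, 1, 2, 3].filter (fun i => i ≠ pi)
  let si := others.tail.foldl (fun p i => if vals.getD i 0 > vals.getD p 0 then i else p)
    (others.headD 0)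
  -- the getD defaults below are unreachable (pi, si < 4 and pi ≠ si)
  [("archetype", (pvArchTable.getD pi []).getD si "Unknown"),
   ("primary", names.getD pi ""), ("secondary", names.getD si "")]

-- ===== PRECONDITION & SPEC =====
def Spec_determine_archetype (stats : List (String × Int)) (out : List (String × String)) : Prop := out = determine_archetype_alt stats
instance (stats : List (String × Int)) (out : List (String × String)) : Decidable (Spec_determine_archetype stats out) := by unfold Spec_determine_archetype; infer_instance

-- ===== CLAIM (what is proved, stated in full; the proofs are below) =====
def Claim_equal_determine_archetype : Prop := ∀ (stats : List (String × Int)), Dom_determine_archetype stats → Spec_determine_archetype stats (determine_archetype stats)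

-- ===== LEMMAS AND PROOFS =====

-- both ports depend on stats only through the four trait lookups (definitional)
lemma pv_canonA (stats : List (String × Int)) :
    determine_archetype stats = determine_archetype
      [("bravery", (PySem.Dict.mk stats).getD "bravery" 0),
       ("empathy", (PySem.Dict.mk stats).getD "empathy" 0),
       ("curiosity", (PySem.Dict.mk stats).getD "curiosity" 0),
       ("logic", (PySem.Dict.mk stats).getD "logic" 0)] := rfl

lemma pv_canonB (stats : List (String × Int)) :
    determine_archetype_alt stats = determine_archetype_alt
      [("bravery", (PySem.Dict.mk stats).getD "bravery" 0),
       ("empathy", (PySem.Dict.mk stats).getD "empathy" 0),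
       ("curiosity", (PySem.Dict.mk stats).getD "curiosity" 0),
       ("logic", (PySem.Dict.mk stats).getD "logic" 0)] := rfl

-- core equality over the four trait values: stable reverse sort + pair map
-- = two first-max index scans + table lookup
set_option maxHeartbeats 4000000 in
lemma pv_main (b e c l : Int) :
    determine_archetype [("bravery", b), ("empathy", e), ("curiosity", c), ("logic", l)]
    = determine_archetype_alt [("bravery", b), ("empathy", e), ("curiosity", c), ("logic", l)] := by
  have h1 : (PySem.Dict.mk [("bravery", b), ("empathy", e), ("curiosity", c), ("logic", l)]).getD "bravery" 0 = b := rfl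
  have h2 : (PySem.Dict.mk [("bravery", b), ("empathy", e), ("curiosity", c), ("logic", l)]).getD "empathy" 0 = e := rfl
  have h3 : (PySem.Dict.mk [("bravery", b), ("empathy", e), ("curiosity", c), ("logic", l)]).getD "curiosity" 0 = c := rfl
  have h4 : (PySem.Dict.mk [("bravery", b), ("empathy", e), ("curiosity", c), ("logic", l)]).getD "logic" 0 = l := rfl
  have gi : ((((PySem.Dict.empty.insert "bravery" b).insert "empathy" e).insert "curiosity" c).insert "logic" l).items
      = [("bravery", b), ("empathy", e), ("curiosity", c), ("logic", l)] := rfl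
  simp only [determine_archetype, determine_archetype_alt, PySem.List.sorted_rev_eq_foldl_insertBy,
    List.foldl, List.map, List.filter, List.tail, List.headD, h1, h2, h3, h4, gi,
    PySem.List.insertBy]
  split_ifs <;>
    first
      | rfl
      | omega
      | ((try simp_all [PySem.List.insertBy]) <;>
          first
            | rfl
            | omega
            | ((try split_ifs) <;> (try simp_all [PySem.List.insertBy]) <;>
                first
                  | rfl
                  | omega
                  | ((try split_ifs) <;> (try simp_all) <;> first | rfl | omega)))

-- ===== VERDICT (by name: the statement is the Claim_ definition above) =====
theorem determine_archetype_spec : Claim_equal_determine_archetype := by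
  intro stats _
  unfold Spec_determine_archetype
  rw [pv_canonA stats, pv_canonB stats]
  exact pv_main _ _ _ _
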